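-- pv_equiv track=rewrite | github.com/jimlawton/h800 | h800/registers.py | registerAlias
-- ===== SOURCE A (Python) =====
-- REGISTERS = {
--     'AU1':   0,     # AU-CU Counter No. 1
--     'AU2':   1,     # AU-CU Counter No. 2
--     'SC':    2,     # Sequence Counter
--     'CSC':   3,     # Cosequence Counter
--     'SH':    4,     # Sequence History Register
--     'CSH':   5,     # Cosequence History Register
--     'UTR':   6,     # Unprogrammed Transfer Register
--     'MXR':   7,     # Mask Index Register
--     'X0':    8,     # Index Register 0
--     'X1':    9,     # Index Register 1
--     'X2':   10,     # Index Register 2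
--     'X3':   11,     # Index Register 3
--     'X4':   12,     # Index Register 4
--     'X5':   13,     # Index Register 5
--     'X6':   14,     # Index Register 6
--     'X7':   15,     # Index Register 7
--     'R0':   16,     # General Purpose Register
--     'R1':   17,     # General Purpose Register
--     'R2':   18,     # General Purpose Register
--     'R3':   19,     # General Purpose Register
--     'R4':   20,     # General Purpose Register
--     'R5':   21,     # General Purpose Register
--     'R6':   22,     # General Purpose Register
--     'R7':   23,     # General Purpose Register
--     'S0':   24,     # General Purpose Register
--     'S1':   25,     # General Purpose Register
--     'S2':   26,     # General Purpose Register
--     'S3':   27,     # General Purpose Register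
--     'S4':   28,     # General Purpose Register
--     'S5':   29,     # General Purpose Register
--     'S6':   30,     # General Purpose Register
--     'S7':   31      # General Purpose Register
-- }
--
-- ALIASES = {
--     'RAC':  28,     # Read Address Counter
--     'DRAC': 29,     # Distributed Read Address Counter
--     'WAC':  30,     # Write Address Counter
--     'DWAC': 31      # Distributed Write Address Counter
-- }
--
-- def registerAlias(number):
--     "Return the register alias for the specified number."
--     for name in ALIASES:
--         if ALIASES[name] == number:
--             return name
--     for name in REGISTERS:
--         if REGISTERS[name] == number:
--             return name
--     raise ValueError("Invalid register number %d!" % number)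
-- ===== SOURCE B (Python) =====
-- # Register values are the contiguous range 0..31, with alias names taking
-- # precedence at 28..31, so a direct position-indexed table replaces the scans.
-- _NAMES = [
--     'AU1', 'AU2', 'SC', 'CSC', 'SH', 'CSH', 'UTR', 'MXR',
--     'X0', 'X1', 'X2', 'X3', 'X4', 'X5', 'X6', 'X7',
--     'R0', 'R1', 'R2', 'R3', 'R4', 'R5', 'R6', 'R7',
--     'S0', 'S1', 'S2', 'S3', 'RAC', 'DRAC', 'WAC', 'DWAC'
-- ]
--
-- def registerAlias(number):
--     "Return the register alias for the specified number."
--     if 0 <= number < 32: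
--         return _NAMES[number]
--     raise ValueError("Invalid register number %d!" % number)
-- ===== Notes on version B (the rewrite author's own statement) =====
-- stated objective: simpler
-- what changed: Exploits that register numbers form the contiguous range 0..31 (aliases shadowing 28..31): B replaces A's two linear value-scans over the dicts by a direct lookup into a fixed position-indexed name table after one range check.
import Mathlib
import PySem

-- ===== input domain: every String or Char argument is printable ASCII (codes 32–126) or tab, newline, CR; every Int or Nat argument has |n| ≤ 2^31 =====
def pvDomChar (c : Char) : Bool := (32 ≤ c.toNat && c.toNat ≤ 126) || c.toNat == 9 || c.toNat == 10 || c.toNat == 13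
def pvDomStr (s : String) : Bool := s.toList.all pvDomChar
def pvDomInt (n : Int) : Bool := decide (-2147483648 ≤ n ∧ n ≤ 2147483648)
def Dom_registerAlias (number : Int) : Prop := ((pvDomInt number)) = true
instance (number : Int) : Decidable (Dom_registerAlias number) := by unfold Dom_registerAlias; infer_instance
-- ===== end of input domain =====

-- B replaces A's two value-scans by a single range check and a direct lookup in a
-- fixed position-indexed name table (values are exactly the contiguous range 0..31).

-- ===== PORT A =====
def pvREGISTERS : List (String × Int) :=
  [("AU1", 0), ("AU2", 1), ("SC", 2), ("CSC", 3), ("SH", 4), ("CSH", 5),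
   ("UTR", 6), ("MXR", 7), ("X0", 8), ("X1", 9), ("X2", 10), ("X3", 11),
   ("X4", 12), ("X5", 13), ("X6", 14), ("X7", 15), ("R0", 16), ("R1", 17),
   ("R2", 18), ("R3", 19), ("R4", 20), ("R5", 21), ("R6", 22), ("R7", 23),
   ("S0", 24), ("S1", 25), ("S2", 26), ("S3", 27), ("S4", 28), ("S5", 29),
   ("S6", 30), ("S7", 31)]

def pvALIASES : List (String × Int) :=
  [("RAC", 28), ("DRAC", 29), ("WAC", 30), ("DWAC", 31)]

-- the 'for name in D: if D[name] == number: return name' loop, step for step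
def pvScanA : List (String × Int) → Int → Option String
  | [], _ => none
  | (k, v) :: rest, n => if v == n then some k else pvScanA rest n

def registerAlias (number : Int) : String :=
  match pvScanA pvALIASES number with
  | some name => name
  | none =>
    match pvScanA pvREGISTERS number with
    | some name => name
    | none => ""   -- Python raises ValueError here; excluded by Pre_registerAlias

-- ===== PORT B =====
def pvNAMES : List String :=
  ["AU1", "AU2", "SC", "CSC", "SH", "CSH", "UTR", "MXR",
   "X0", "X1", "X2", "X3", "X4", "X5", "X6", "X7",
   "R0", "R1", "R2", "R3", "R4", "R5", "R6", "R7",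
   "S0", "S1", "S2", "S3", "RAC", "DRAC", "WAC", "DWAC"]

def registerAlias_alt (number : Int) : String :=
  if 0 ≤ number ∧ number < 32 then
    (PySem.List.pyGet? pvNAMES number).getD ""   -- always some inside the range check
  else
    ""   -- Python raises ValueError here; excluded by Pre_registerAlias

-- ===== PRECONDITION & SPEC =====
-- A raises ValueError on every number outside 0..31; exactly those are excluded.
def Pre_registerAlias (number : Int) : Prop := 0 ≤ number ∧ number ≤ 31
instance (number : Int) : Decidable (Pre_registerAlias number) := by unfold Pre_registerAlias; infer_instance
def pvWitness_registerAlias : Int := (29)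

def Spec_registerAlias (number : Int) (out : String) : Prop := out = registerAlias_alt number
instance (number : Int) (out : String) : Decidable (Spec_registerAlias number out) := by unfold Spec_registerAlias; infer_instance

-- ===== CLAIM (what is proved, stated in full; the proofs are below) =====
def Claim_equal_registerAlias : Prop := ∀ (number : Int), Dom_registerAlias number → Pre_registerAlias number → Spec_registerAlias number (registerAlias number)

-- ===== LEMMAS AND PROOFS =====

-- ===== VERDICT (by name: the statement is the Claim_ definition above) =====
theorem registerAlias_spec : Claim_equal_registerAlias := by
  intro n _ hp
  unfold Spec_registerAlias
  obtain ⟨h0, h31⟩ := hp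
  interval_cases n <;> decide
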